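-- pv_equiv track=rewrite | github.com/sydenham/Kodolamacz | Funkcje/funkcje.py | czyAnagram
-- ===== SOURCE A (Python) =====
-- def czyAnagram(base, check):
--     word = dict()
--     for i in base:
--         word[i] = word.get(i, 0)+1
--     for i in check:
--         if i not in word.keys() or word[i] == 0:
--             return False
--         else:
--             word[i] = word[i]-1
--     return True
-- ===== SOURCE B (Python) =====
-- def czyAnagram(base, check):
--     return all(check.count(c) <= base.count(c) for c in set(check))
-- ===== Notes on version B (the rewrite author's own statement) =====
-- stated objective: simpler
-- what changed: Replaces the build-a-dict-then-decrement-and-bail loop by a one-line multiset comparison: for every distinct character of check, compare its full count in check with its full count in base.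
import Mathlib
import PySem

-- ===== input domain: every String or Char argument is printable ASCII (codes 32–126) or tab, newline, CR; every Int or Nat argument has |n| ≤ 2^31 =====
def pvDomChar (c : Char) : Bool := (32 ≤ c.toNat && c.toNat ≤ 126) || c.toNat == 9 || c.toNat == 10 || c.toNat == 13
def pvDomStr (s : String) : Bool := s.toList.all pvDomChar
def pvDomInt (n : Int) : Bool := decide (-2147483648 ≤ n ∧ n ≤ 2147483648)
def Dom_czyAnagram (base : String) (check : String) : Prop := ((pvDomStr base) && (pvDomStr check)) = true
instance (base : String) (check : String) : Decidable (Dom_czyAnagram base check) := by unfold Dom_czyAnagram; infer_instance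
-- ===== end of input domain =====

-- B replaces A's dict-building consume-and-decrement loop by a per-distinct-character
-- full-count comparison (simpler decomposition; return value only is compared).

-- ===== PORT A =====
-- the 'for i in check' loop: word[i] absent or 0 → False, else decrement and continue
def czyALoop (d : PySem.Dict Char Int) : List Char → Bool
  | [] => true
  | i :: rest =>
    match d.get? i with
    | none => false
    | some v => if v = 0 then false else czyALoop (d.insert i (v - 1)) rest

def czyAnagram (base : String) (check : String) : Bool :=
  let word := base.toList.foldl (fun d i => d.insert i (d.getD i 0 + 1)) PySem.Dict.empty
  czyALoop word check.toList

-- ===== PORT B =====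
def czyAnagram_alt (base : String) (check : String) : Bool :=
  (PySem.Set.ofList check.toList).all
    (fun c => decide (check.toList.count c ≤ base.toList.count c))

-- ===== PRECONDITION & SPEC =====
def Spec_czyAnagram (base : String) (check : String) (out : Bool) : Prop := out = czyAnagram_alt base check
instance (base : String) (check : String) (out : Bool) : Decidable (Spec_czyAnagram base check out) := by unfold Spec_czyAnagram; infer_instance

-- ===== CLAIM (what is proved, stated in full; the proofs are below) =====
def Claim_equal_czyAnagram : Prop := ∀ (base : String) (check : String), Dom_czyAnagram base check → Spec_czyAnagram base check (czyAnagram base check)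

-- ===== LEMMAS AND PROOFS =====

-- A's loop (over a dict with nonnegative counts) succeeds iff every character of xs
-- occurs at most as often in xs as its count in d
lemma czyALoop_iff (xs : List Char) (d : PySem.Dict Char Int)
    (h0 : ∀ c, 0 ≤ d.getD c 0) :
    czyALoop d xs = true ↔ ∀ c ∈ xs, (xs.count c : Int) ≤ d.getD c 0 := by
  induction xs generalizing d with
  | nil => simp [czyALoop]
  | cons i rest ih =>
    simp only [czyALoop]
    cases hg : d.get? i with
    | none =>
      have hD : d.getD i 0 = 0 := PySem.Dict.getD_of_get?_eq_none d 0 hg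
      constructor
      · intro h; exact absurd h (by simp)
      · intro h
        have := h i (List.mem_cons_self)
        rw [hD, List.count_cons_self] at this
        exact absurd this (by push_cast; omega)
    | some v =>
      have hDv : d.getD i 0 = v := PySem.Dict.getD_of_get?_eq_some d 0 hg
      have hv0 : 0 ≤ v := hDv ▸ h0 i
      show (if v = 0 then false else czyALoop (d.insert i (v - 1)) rest) = true ↔ _
      by_cases hv : v = 0
      · rw [if_pos hv]
        constructor
        · intro h; exact absurd h (by simp)
        · intro h
          have := h i (List.mem_cons_self)
          rw [hDv, hv, List.count_cons_self] at this
          exact absurd this (by push_cast; omega)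
      · rw [if_neg hv]
        have h0' : ∀ c, 0 ≤ (d.insert i (v - 1)).getD c 0 := by
          intro c
          rw [PySem.Dict.getD_insert]
          by_cases hci : c = i
          · rw [if_pos hci]; omega
          · rw [if_neg hci]; exact h0 c
        rw [ih _ h0']
        constructor
        · intro h c hc
          by_cases hci : c = i
          · subst hci
            rw [List.count_cons_self, hDv]
            by_cases hm : c ∈ rest
            · have := h c hm
              rw [PySem.Dict.getD_insert, if_pos rfl] at this
              push_cast
              omega
            · rw [List.count_eq_zero_of_not_mem hm]
              push_cast
              omega
          · rcases List.mem_cons.mp hc with rfl | hm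
            · exact absurd rfl hci
            · have := h c hm
              rw [PySem.Dict.getD_insert, if_neg hci] at this
              rw [List.count_cons_of_ne (fun e => hci e.symm)]
              omega
        · intro h c hc
          rw [PySem.Dict.getD_insert]
          by_cases hci : c = i
          · subst hci
            rw [if_pos rfl]
            have := h c (List.mem_cons_self)
            rw [List.count_cons_self, hDv] at this
            push_cast at this ⊢
            omega
          · rw [if_neg hci]
            have := h c (List.mem_cons_of_mem _ hc)
            rw [List.count_cons_of_ne (fun e => hci e.symm)] at this
            exact this

lemma czyAnagram_iff (base check : String) :
    czyAnagram base check = true ↔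
      ∀ c ∈ check.toList, check.toList.count c ≤ base.toList.count c := by
  unfold czyAnagram
  rw [PySem.Dict.foldl_insert_getD_add_one_eq_counter,
    czyALoop_iff _ _ (fun c => by rw [PySem.Dict.getD_counter]; positivity)]
  constructor
  · intro h c hc
    have := h c hc
    rw [PySem.Dict.getD_counter] at this
    exact_mod_cast this
  · intro h c hc
    rw [PySem.Dict.getD_counter]
    exact_mod_cast h c hc

-- ===== VERDICT (by name: the statement is the Claim_ definition above) =====
theorem czyAnagram_spec : Claim_equal_czyAnagram := by
  intro base check _
  unfold Spec_czyAnagram czyAnagram_alt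
  rw [Bool.eq_iff_iff, czyAnagram_iff, List.all_eq_true]
  constructor
  · intro h c hc
    have : c ∈ check.toList := (PySem.Set.mem_ofList _ _).mp hc
    exact decide_eq_true (h c this)
  · intro h c hc
    have := h c ((PySem.Set.mem_ofList _ _).mpr hc)
    exact of_decide_eq_true this
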